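-- pv_equiv track=rewrite | github.com/usarica/FNAL-QCDecodingTests | CNNModel.py | get_layer_output_map
-- ===== SOURCE A (Python) =====
-- def get_layer_output_map(d, is_symmetric):
--   if not is_symmetric:
--     return [ ii for ii in range(d**2) ]
--   else:
--     res = []
--     for iy in range(d):
--       for ix in range(d):
--         ox = ix
--         oy = iy
--         if not (ix>iy or (ix==iy and ix<(d+1)//2)):
--           ox = (d-ix-1)
--           oy = (d-iy-1)
--         idx_kqubit = ox+oy*d - (oy*(oy+1))//2
--         if oy>=(d+1)//2:
--           idx_kqubit = idx_kqubit - (oy-(d+1)//2+1)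
--         res.append(idx_kqubit)
--     return res
-- ===== SOURCE B (Python) =====
-- def _is_rep(h, iy, ix):
--   return ix > iy or (ix == iy and ix < h)
--
-- def get_layer_output_map(d, is_symmetric):
--   if not is_symmetric:
--     return list(range(d * d))
--   h = (d + 1) // 2
--   reps = [(iy, ix) for iy in range(d) for ix in range(d) if _is_rep(h, iy, ix)]
--   table = {cell: n for n, cell in enumerate(reps)}
--   out = []
--   for iy in range(d):
--     for ix in range(d):
--       if _is_rep(h, iy, ix):
--         out.append(table[(iy, ix)])
--       else:
--         out.append(table[(d - iy - 1, d - ix - 1)])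
--   return out
-- ===== Notes on version B (the rewrite author's own statement) =====
-- stated objective: alternative
-- what changed: Replaces A's per-cell closed-form idx_kqubit arithmetic with a two-pass table construction: pass 1 enumerates the representative cells of the symmetry into a dict mapping each representative to its sequential number, pass 2 maps every cell to the table entry of its canonical (possibly point-reflected) representative.
import Mathlib
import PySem

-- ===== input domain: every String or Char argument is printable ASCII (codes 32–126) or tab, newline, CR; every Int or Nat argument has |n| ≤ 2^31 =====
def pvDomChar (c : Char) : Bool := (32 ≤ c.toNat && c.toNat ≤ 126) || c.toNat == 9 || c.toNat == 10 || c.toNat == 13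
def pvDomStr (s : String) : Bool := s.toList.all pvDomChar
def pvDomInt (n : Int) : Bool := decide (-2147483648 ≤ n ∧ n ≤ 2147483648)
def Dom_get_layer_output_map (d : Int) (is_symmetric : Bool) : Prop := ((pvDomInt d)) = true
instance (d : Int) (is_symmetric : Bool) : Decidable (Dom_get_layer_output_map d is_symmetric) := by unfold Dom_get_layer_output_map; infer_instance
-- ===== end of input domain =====

-- B replaces A's per-cell closed-form index arithmetic with a two-pass build: first a dict
-- numbering the representative cells in row-major order, then a lookup pass over all cells.

-- ===== PORT A =====
def get_layer_output_map (d : Int) (is_symmetric : Bool) : List Int :=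
  if !is_symmetric then
    PySem.List.pyRange 0 (d ^ 2) 1
  else
    (PySem.List.pyRange 0 d 1).foldl (fun res iy =>
      (PySem.List.pyRange 0 d 1).foldl (fun res ix =>
        let ox := ix
        let oy := iy
        let p :=
          if !(decide (ix > iy) || (ix == iy && decide (ix < PySem.Int.floordiv (d + 1) 2))) then
            (d - ix - 1, d - iy - 1)
          else (ox, oy)
        let idx_kqubit := p.1 + p.2 * d - PySem.Int.floordiv (p.2 * (p.2 + 1)) 2
        let idx_kqubit :=
          if p.2 ≥ PySem.Int.floordiv (d + 1) 2 then
            idx_kqubit - (p.2 - PySem.Int.floordiv (d + 1) 2 + 1)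
          else idx_kqubit
        res ++ [idx_kqubit]) res) []

-- ===== PORT B =====
-- helper _is_rep(h, iy, ix) of Source B
def pvIsRep (h iy ix : Int) : Bool := decide (ix > iy) || (ix == iy && decide (ix < h))

def get_layer_output_map_alt (d : Int) (is_symmetric : Bool) : List Int :=
  if !is_symmetric then
    PySem.List.pyRange 0 (d * d) 1
  else
    let h := PySem.Int.floordiv (d + 1) 2
    let reps : List (Int × Int) :=
      (PySem.List.pyRange 0 d 1).flatMap (fun iy =>
        ((PySem.List.pyRange 0 d 1).filter (fun ix => pvIsRep h iy ix)).map (fun ix => (iy, ix)))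
    let table : PySem.Dict (Int × Int) Int :=
      (PySem.List.enumerate reps 0).foldl (fun t p => t.insert p.2 p.1) PySem.Dict.empty
    -- Python's table[...] lookups always hit an existing key (proved below); getD 0 is value-faithful
    (PySem.List.pyRange 0 d 1).foldl (fun out iy =>
      (PySem.List.pyRange 0 d 1).foldl (fun out ix =>
        if pvIsRep h iy ix then out ++ [table.getD (iy, ix) 0]
        else out ++ [table.getD (d - iy - 1, d - ix - 1) 0]) out) []

-- ===== PRECONDITION & SPEC =====
def Spec_get_layer_output_map (d : Int) (is_symmetric : Bool) (out : List Int) : Prop := out = get_layer_output_map_alt d is_symmetric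
instance (d : Int) (is_symmetric : Bool) (out : List Int) : Decidable (Spec_get_layer_output_map d is_symmetric out) := by unfold Spec_get_layer_output_map; infer_instance

-- ===== CLAIM (what is proved, stated in full; the proofs are below) =====
def Claim_equal_get_layer_output_map : Prop := ∀ (d : Int) (is_symmetric : Bool), Dom_get_layer_output_map d is_symmetric → Spec_get_layer_output_map d is_symmetric (get_layer_output_map d is_symmetric)

-- ===== LEMMAS AND PROOFS =====
-- abbreviations used only by the proofs
def pvH (d : Int) : Int := PySem.Int.floordiv (d + 1) 2
def pvTri (n : Int) : Int := PySem.Int.floordiv (n * (n + 1)) 2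
def pvF (d oy ox : Int) : Int := ox + oy * d - pvTri oy - (if pvH d ≤ oy then oy - pvH d + 1 else 0)
def pvRow (d iy : Int) : List (Int × Int) :=
  ((PySem.List.pyRange 0 d 1).filter (fun ix => pvIsRep (pvH d) iy ix)).map (fun ix => (iy, ix))
def pvReps (d : Int) : List (Int × Int) := (PySem.List.pyRange 0 d 1).flatMap (pvRow d)
def pvTbl (d : Int) : PySem.Dict (Int × Int) Int :=
  (PySem.List.enumerate (pvReps d) 0).foldl (fun t p => t.insert p.2 p.1) PySem.Dict.empty

theorem pvH_spec (d : Int) : 2 * pvH d ≤ d + 1 ∧ d + 1 < 2 * pvH d + 2 := by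
  have h := (PySem.Int.floordiv_eq_iff_of_pos (a := d + 1) (b := 2) (q := pvH d) (by norm_num)).mp rfl
  omega

theorem pvTri_two_mul (n : Int) : 2 * pvTri n = n * (n + 1) := by
  obtain ⟨k, hk⟩ : ∃ k, n * (n + 1) = 2 * k := by
    rcases Int.even_mul_succ_self n with ⟨k, hk⟩
    exact ⟨k, by omega⟩
  unfold pvTri
  rw [hk, PySem.Int.floordiv_eq_ediv_of_pos (by norm_num), Int.mul_ediv_cancel_left _ (by norm_num)]

theorem pvTri_sub (n : Int) : pvTri n = pvTri (n - 1) + n := by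
  have a := pvTri_two_mul n
  have b := pvTri_two_mul (n - 1)
  have c : n * (n + 1) - (n - 1) * (n - 1 + 1) = 2 * n := by ring
  omega

theorem pvIsRep_iff (h iy ix : Int) : pvIsRep h iy ix = true ↔ iy < ix ∨ (ix = iy ∧ ix < h) := by
  simp [pvIsRep]

theorem pvRow_len (d j : Int) (h0 : 0 ≤ j) (h1 : j < d) :
    ((pvRow d j).length : Int) = d - 1 - j + (if j < pvH d then 1 else 0) := by
  unfold pvRow
  rw [PySem.List.pyRange_one_append 0 j d h0 (le_of_lt h1),
      PySem.List.pyRange_one_cons h1]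
  have hpre : (PySem.List.pyRange 0 j 1).filter (fun ix => pvIsRep (pvH d) j ix) = [] := by
    apply List.filter_eq_nil_iff.mpr
    intro x hx
    rw [PySem.List.mem_pyRange_one] at hx
    simp [pvIsRep]; omega
  have hsuf : (PySem.List.pyRange (j+1) d 1).filter (fun ix => pvIsRep (pvH d) j ix)
      = PySem.List.pyRange (j+1) d 1 := by
    apply List.filter_eq_self.mpr
    intro x hx
    rw [PySem.List.mem_pyRange_one] at hx
    simp [pvIsRep]; omega
  rw [List.filter_append, hpre, List.filter_cons, List.nil_append, hsuf]
  by_cases hj : j < pvH d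
  · simp [pvIsRep, hj, PySem.List.length_pyRange_one]
    omega
  · simp [pvIsRep, hj, PySem.List.length_pyRange_one]
    omega

theorem pvPrefix_len (d : Int) : ∀ (k : Nat), (k : Int) ≤ d →
    ((((PySem.List.pyRange 0 (k : Int) 1).flatMap (pvRow d)).length : Int)
      = (k : Int) * d - (k : Int) - pvTri ((k : Int) - 1) + min (k : Int) (pvH d)) := by
  intro k
  induction k with
  | zero =>
    intro hk
    have hh := pvH_spec d
    simp
    have : pvTri (-1) = 0 := by have := pvTri_two_mul (-1); omega
    omega
  | succ k ih =>
    intro hk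
    push_cast at hk ⊢
    have hk' : (k : Int) ≤ d := by omega
    rw [show ((k : Int) + 1) = (k : Int) + 1 from rfl,
        PySem.List.pyRange_one_succ_right (by positivity)]
    rw [List.flatMap_append, List.length_append]
    have hrow := pvRow_len d k (by positivity) (by omega)
    have hpre := ih hk'
    have htri : pvTri ((k : Int) + 1 - 1) = pvTri ((k : Int) - 1) + k := by
      have := pvTri_sub (k : Int); simpa using this
    have hexp : ((k : Int) + 1) * d = (k : Int) * d + d := by ring
    simp only [List.flatMap_cons, List.flatMap_nil, List.append_nil]
    push_cast
    have hh := pvH_spec d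
    by_cases hc : (k : Int) < pvH d
    · rw [if_pos hc] at hrow
      rw [min_eq_left (by omega)] at hpre
      rw [min_eq_left (by omega), hexp, htri]
      linarith [hpre, hrow]
    · rw [if_neg hc] at hrow
      rw [min_eq_right (by omega)] at hpre
      rw [min_eq_right (by omega), hexp, htri]
      linarith [hpre, hrow]
theorem pvCanonRep (d iy ix : Int) (h0 : 0 ≤ iy) (h1 : iy < d) (h2 : 0 ≤ ix) (h3 : ix < d)
    (hn : pvIsRep (pvH d) iy ix = false) :
    pvIsRep (pvH d) (d - iy - 1) (d - ix - 1) = true := by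
  have hh := pvH_spec d
  simp only [pvIsRep, Bool.or_eq_false_iff, Bool.or_eq_true, Bool.and_eq_false_iff,
    Bool.and_eq_true, decide_eq_false_iff_not, decide_eq_true_eq, beq_iff_eq,
    beq_eq_false_iff_ne] at hn ⊢
  omega

theorem pvRowPrefix_len (d oy ox : Int) (h0 : 0 ≤ oy) (h2 : 0 ≤ ox)
    (hrep : pvIsRep (pvH d) oy ox = true) :
    (((PySem.List.pyRange 0 ox 1).filter (fun ix => pvIsRep (pvH d) oy ix)).length : Int)
      = if ox = oy then 0 else ox - oy - 1 + (if oy < pvH d then 1 else 0) := by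
  rw [pvIsRep_iff] at hrep
  by_cases hd : ox = oy
  · rw [if_pos hd]
    have : (PySem.List.pyRange 0 ox 1).filter (fun ix => pvIsRep (pvH d) oy ix) = [] := by
      apply List.filter_eq_nil_iff.mpr
      intro x hx
      rw [PySem.List.mem_pyRange_one] at hx
      simp [pvIsRep]; omega
    rw [this]; simp
  · rw [if_neg hd]
    have hlt : oy < ox := by rcases hrep with h | ⟨h, _⟩ <;> omega
    rw [PySem.List.pyRange_one_append 0 oy ox h0 (le_of_lt hlt),
        PySem.List.pyRange_one_cons hlt, List.filter_append, List.filter_cons]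
    have hpre : (PySem.List.pyRange 0 oy 1).filter (fun ix => pvIsRep (pvH d) oy ix) = [] := by
      apply List.filter_eq_nil_iff.mpr
      intro x hx
      rw [PySem.List.mem_pyRange_one] at hx
      simp [pvIsRep]; omega
    have hsuf : (PySem.List.pyRange (oy+1) ox 1).filter (fun ix => pvIsRep (pvH d) oy ix)
        = PySem.List.pyRange (oy+1) ox 1 := by
      apply List.filter_eq_self.mpr
      intro x hx
      rw [PySem.List.mem_pyRange_one] at hx
      simp [pvIsRep]; omega
    rw [hpre, hsuf, List.nil_append]
    by_cases hj : oy < pvH d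
    · simp [pvIsRep, hj, PySem.List.length_pyRange_one]; omega
    · simp [pvIsRep, hj, PySem.List.length_pyRange_one]; omega

theorem pvMem_pvRow (d iy : Int) (p : Int × Int) (hp : p ∈ pvRow d iy) : p.1 = iy := by
  unfold pvRow at hp
  rcases List.mem_map.mp hp with ⟨ix, _, rfl⟩
  rfl

theorem pvReps_nodup (d : Int) : (pvReps d).Nodup := by
  unfold pvReps
  rw [List.nodup_flatMap]
  constructor
  · intro iy _
    unfold pvRow
    apply List.Nodup.map
    · intro a b hab
      exact congrArg Prod.snd hab
    · exact (PySem.List.nodup_pyRange_one 0 d).filter _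
  · apply List.Pairwise.imp_of_mem (l := PySem.List.pyRange 0 d 1)
      (R := fun a b => a < b)
    · intro a b _ _ hab
      intro p hpa hpb
      have := pvMem_pvRow d a p hpa
      have := pvMem_pvRow d b p hpb
      omega
    · exact PySem.List.pairwise_lt_pyRange_one 0 d

theorem pvReps_decomp (d oy ox : Int) (h0 : 0 ≤ oy) (h1 : oy < d) (h2 : 0 ≤ ox) (h3 : ox < d)
    (hrep : pvIsRep (pvH d) oy ox = true) :
    ∃ P Q, pvReps d = P ++ (oy, ox) :: Q ∧ (P.length : Int) = pvF d oy ox := by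
  have hrow : pvRow d oy
      = ((PySem.List.pyRange 0 ox 1).filter (fun ix => pvIsRep (pvH d) oy ix)).map
          (fun ix => (oy, ix))
        ++ (oy, ox) :: ((PySem.List.pyRange (ox+1) d 1).filter (fun ix => pvIsRep (pvH d) oy ix)).map
          (fun ix => (oy, ix)) := by
    unfold pvRow
    rw [PySem.List.pyRange_one_append 0 ox d h2 (le_of_lt h3), PySem.List.pyRange_one_cons h3,
        List.filter_append, List.filter_cons]
    simp only [hrep, if_pos, List.map_append, List.map_cons]
  have hsplit : pvReps d
      = (PySem.List.pyRange 0 oy 1).flatMap (pvRow d) ++ pvRow d oy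
        ++ (PySem.List.pyRange (oy+1) d 1).flatMap (pvRow d) := by
    unfold pvReps
    rw [PySem.List.pyRange_one_append 0 oy d h0 (le_of_lt h1), PySem.List.pyRange_one_cons h1,
        List.flatMap_append, List.flatMap_cons, List.append_assoc]
  refine ⟨(PySem.List.pyRange 0 oy 1).flatMap (pvRow d)
      ++ ((PySem.List.pyRange 0 ox 1).filter (fun ix => pvIsRep (pvH d) oy ix)).map
          (fun ix => (oy, ix)),
    ((PySem.List.pyRange (ox+1) d 1).filter (fun ix => pvIsRep (pvH d) oy ix)).map
          (fun ix => (oy, ix))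
      ++ (PySem.List.pyRange (oy+1) d 1).flatMap (pvRow d), ?_, ?_⟩
  · rw [hsplit, hrow]
    simp [List.append_assoc]
  · rw [List.length_append, List.length_map]
    push_cast
    have hcast : ((oy.toNat : Nat) : Int) = oy := Int.toNat_of_nonneg h0
    have hA := pvPrefix_len d oy.toNat (by omega)
    rw [hcast] at hA
    have hB := pvRowPrefix_len d oy ox h0 h2 hrep
    have htri := pvTri_sub oy
    have hh := pvH_spec d
    rw [pvIsRep_iff] at hrep
    unfold pvF
    by_cases hd : ox = oy
    · have hoyh : oy < pvH d := by rcases hrep with h | ⟨h, h'⟩ <;> omega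
      rw [if_pos hd] at hB
      rw [min_eq_left (by omega)] at hA
      rw [if_neg (by omega)]
      linarith [hA, hB]
    · rw [if_neg hd] at hB
      have hlt : oy < ox := by rcases hrep with h | ⟨h, h'⟩ <;> omega
      by_cases hj : oy < pvH d
      · rw [if_pos hj] at hB
        rw [min_eq_left (by omega)] at hA
        rw [if_neg (by omega)]
        linarith [hA, hB]
      · rw [if_neg hj] at hB
        rw [min_eq_right (by omega)] at hA
        rw [if_pos (by omega)]
        linarith [hA, hB]

theorem pvTbl_items (d : Int) :
    (pvTbl d).items = (PySem.List.enumerate (pvReps d) 0).map (fun p => (p.2, p.1)) := by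
  unfold pvTbl
  have h := PySem.Dict.items_foldl_insert_fresh
      (l := PySem.List.enumerate (pvReps d) 0) (k := fun p => p.2) (v := fun p => p.1)
      (d := PySem.Dict.empty)
      (by intro a _; exact PySem.Dict.contains_empty _)
      (by rw [PySem.List.map_snd_enumerate]; exact pvReps_nodup d)
  simpa using h

theorem pvTbl_getD (d oy ox : Int) (h0 : 0 ≤ oy) (h1 : oy < d) (h2 : 0 ≤ ox) (h3 : ox < d)
    (hrep : pvIsRep (pvH d) oy ox = true) :
    (pvTbl d).getD (oy, ox) 0 = pvF d oy ox := by
  obtain ⟨P, Q, hPQ, hlen⟩ := pvReps_decomp d oy ox h0 h1 h2 h3 hrep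
  have hmem : (((oy, ox), (P.length : Int)) : (Int × Int) × Int) ∈ (pvTbl d).items := by
    rw [pvTbl_items, hPQ, PySem.List.enumerate_append, PySem.List.enumerate_cons]
    rw [List.map_append, List.map_cons]
    refine List.mem_append_right _ ?_
    simp
  have hnodup : (pvTbl d).keys.Nodup := by
    have : (pvTbl d).keys = pvReps d := by
      show (pvTbl d).items.map (·.1) = pvReps d
      rw [pvTbl_items, List.map_map]
      exact PySem.List.map_snd_enumerate (pvReps d) 0
    rw [this]; exact pvReps_nodup d
  rw [PySem.Dict.getD_of_mem_items (pvTbl d) hmem hnodup 0, hlen]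

theorem pv_ite_append {α : Type} (c : Prop) [Decidable c] (a : List α) (x y : α) :
    (if c then a ++ [x] else a ++ [y]) = a ++ [if c then x else y] := by
  split_ifs <;> rfl

theorem pvMain (d : Int) : get_layer_output_map d true = get_layer_output_map_alt d true := by
  unfold get_layer_output_map get_layer_output_map_alt
  simp only [Bool.not_true, Bool.false_eq_true, if_false]
  simp only [pv_ite_append, PySem.List.foldl_append_singleton_eq_map,
    PySem.List.foldl_append_eq_flatMap, List.nil_append]
  apply List.flatMap_congr
  intro iy hiy
  apply List.map_congr_left
  intro ix hix
  rw [PySem.List.mem_pyRange_one] at hiy hix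
  by_cases hr : pvIsRep (pvH d) iy ix = true
  · have hB := pvTbl_getD d iy ix hiy.1 hiy.2 hix.1 hix.2 hr
    have hr' : (decide (ix > iy) || (ix == iy && decide (ix < PySem.Int.floordiv (d + 1) 2))) = true := hr
    have hrB : pvIsRep (PySem.Int.floordiv (d + 1) 2) iy ix = true := hr
    simp only [hr', hrB, Bool.not_true, Bool.false_eq_true, if_false, if_true]
    show (if iy ≥ pvH d then ix + iy * d - pvTri iy - (iy - pvH d + 1)
          else ix + iy * d - pvTri iy) = (pvTbl d).getD (iy, ix) 0
    rw [hB]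
    unfold pvF
    split_ifs with h
    · rfl
    · rw [sub_zero]
  · rw [Bool.not_eq_true] at hr
    have hrep := pvCanonRep d iy ix hiy.1 hiy.2 hix.1 hix.2 hr
    have hB := pvTbl_getD d (d - iy - 1) (d - ix - 1) (by omega) (by omega) (by omega) (by omega) hrep
    have hr' : (decide (ix > iy) || (ix == iy && decide (ix < PySem.Int.floordiv (d + 1) 2))) = false := hr
    have hrB : pvIsRep (PySem.Int.floordiv (d + 1) 2) iy ix = false := hr
    simp only [hr', hrB, Bool.not_false, Bool.false_eq_true, if_false, if_true]
    show (if d - iy - 1 ≥ pvH d then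
            (d - ix - 1) + (d - iy - 1) * d - pvTri (d - iy - 1) - ((d - iy - 1) - pvH d + 1)
          else (d - ix - 1) + (d - iy - 1) * d - pvTri (d - iy - 1))
        = (pvTbl d).getD (d - iy - 1, d - ix - 1) 0
    rw [hB]
    unfold pvF
    split_ifs with h
    · rfl
    · rw [sub_zero]

-- ===== VERDICT (by name: the statement is the Claim_ definition above) =====
theorem get_layer_output_map_spec : Claim_equal_get_layer_output_map := by
  intro d is_symmetric _
  unfold Spec_get_layer_output_map
  cases is_symmetric with
  | false =>
    show PySem.List.pyRange 0 (d ^ 2) 1 = PySem.List.pyRange 0 (d * d) 1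
    rw [sq]
  | true => exact pvMain d
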